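-- pv_equiv track=rewrite | github.com/EemeliSaari/SchoolWork | Basics/15_shoppingbag.py | list_sorter
-- ===== SOURCE A (Python) =====
-- def list_sorter(dict_variable):
--     """
--     Checks all the available products in all the stores
--     :param dict_variable: dict of the shops and available items
--     :return: product and products price
--     """
--
--     new_dict = {}
--
--     for shops in dict_variable:
--
--         for item in dict_variable[shops]:
--
--             if item[0] in new_dict:
--
--                 if item[1] < new_dict[item[0]]:
--
--                     new_dict[item[0]] = item[1]
--
--             else:
--                 new_dict[item[0]] = item[1]
--
--     return new_dict
-- ===== SOURCE B (Python) =====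
-- def list_sorter(dict_variable):
--     """
--     Checks all the available products in all the stores
--     :param dict_variable: dict of the shops and available items
--     :return: product and products price
--     """
--     # Pass 1: group every price by product, keeping first-seen product order.
--     groups = {}
--     for shops in dict_variable:
--         for item in dict_variable[shops]:
--             groups.setdefault(item[0], []).append(item[1])
--     # Pass 2: reduce each price list to its minimum.
--     return {product: min(prices) for product, prices in groups.items()}
-- ===== Notes on version B (the rewrite author's own statement) =====
-- stated objective: alternative
-- what changed: B replaces A's single pass with an inline running-minimum update by a group-then-reduce decomposition: one pass accumulates every price per product into a dict of lists, and a separate comprehension pass reduces each list with min().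
import Mathlib
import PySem

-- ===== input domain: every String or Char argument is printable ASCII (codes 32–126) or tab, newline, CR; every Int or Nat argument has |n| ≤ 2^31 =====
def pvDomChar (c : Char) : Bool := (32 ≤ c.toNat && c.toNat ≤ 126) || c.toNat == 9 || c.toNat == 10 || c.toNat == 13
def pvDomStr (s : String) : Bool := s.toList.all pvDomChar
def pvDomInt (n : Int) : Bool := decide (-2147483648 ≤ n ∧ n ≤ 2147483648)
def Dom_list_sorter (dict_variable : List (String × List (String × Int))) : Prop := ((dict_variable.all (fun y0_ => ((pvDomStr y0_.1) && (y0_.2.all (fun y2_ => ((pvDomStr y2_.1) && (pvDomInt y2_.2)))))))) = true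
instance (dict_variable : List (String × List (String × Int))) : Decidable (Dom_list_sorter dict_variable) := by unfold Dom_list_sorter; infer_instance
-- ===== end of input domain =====

-- B replaces A's single pass with an inline running minimum by a group-then-reduce
-- decomposition (collect all prices per product, then take min of each list); same cost.


-- ===== PORT A =====
-- 'for shops in dict_variable' iterates the dict's keys in order; 'dict_variable[shops]'
-- is the lookup (the key comes from the same dict, so the KeyError branch of getD is unreachable).
def list_sorter (dict_variable : List (String × List (String × Int))) : List (String × Int) :=
  (dict_variable.foldl (fun new_dict shops =>
      ((PySem.Dict.mk dict_variable).getD shops.1 []).foldl (fun new_dict item =>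
        if new_dict.contains item.1 then
          (if item.2 < new_dict.getD item.1 0 then new_dict.insert item.1 item.2 else new_dict)
        else new_dict.insert item.1 item.2) new_dict)
    PySem.Dict.empty).items

-- ===== PORT B =====
-- groups.setdefault(item[0], []).append(item[1]) sets groups[item[0]] to
-- groups.get(item[0], []) + [item[1]] keeping key position, i.e. Dict.modify;
-- min(prices) is PySem.List.min? (prices is never empty, so the getD default is unreachable).
def list_sorter_alt (dict_variable : List (String × List (String × Int))) : List (String × Int) :=
  (dict_variable.foldl (fun groups shops =>
      ((PySem.Dict.mk dict_variable).getD shops.1 []).foldl (fun groups item =>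
        groups.modify item.1 [] (· ++ [item.2])) groups)
    PySem.Dict.empty).items.map
    (fun q => (q.1, (PySem.List.min? q.2 (fun y => y)).getD 0))

-- ===== PRECONDITION & SPEC =====
def Spec_list_sorter (dict_variable : List (String × List (String × Int))) (out : List (String × Int)) : Prop := out = list_sorter_alt dict_variable
instance (dict_variable : List (String × List (String × Int))) (out : List (String × Int)) : Decidable (Spec_list_sorter dict_variable out) := by unfold Spec_list_sorter; infer_instance

-- ===== CLAIM (what is proved, stated in full; the proofs are below) =====
def Claim_equal_list_sorter : Prop := ∀ (dict_variable : List (String × List (String × Int))), Dom_list_sorter dict_variable → Spec_list_sorter dict_variable (list_sorter dict_variable)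

-- ===== LEMMAS AND PROOFS =====

-- B's reduction 'min(prices)' as a function on one price list
def pvMin (l : List Int) : Int := (PySem.List.min? l (fun y => y)).getD 0

-- one grouped entry reduced to its minimum
def pvRedF (q : String × List Int) : String × Int := (q.1, pvMin q.2)

-- B's grouping dict reduced entrywise: the dict A maintains directly
def pvRed (g : PySem.Dict String (List Int)) : PySem.Dict String Int :=
  PySem.Dict.mk (g.items.map pvRedF)

-- the two loop bodies
def pvStepA (nd : PySem.Dict String Int) (item : String × Int) : PySem.Dict String Int :=
  if nd.contains item.1 then
    (if item.2 < nd.getD item.1 0 then nd.insert item.1 item.2 else nd)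
  else nd.insert item.1 item.2

def pvStepB (g : PySem.Dict String (List Int)) (item : String × Int) : PySem.Dict String (List Int) :=
  g.modify item.1 [] (· ++ [item.2])

theorem pvMin_append (ps : List Int) (v : Int) (h : ps ≠ []) :
    pvMin (ps ++ [v]) = if v < pvMin ps then v else pvMin ps := by
  obtain ⟨x, t, rfl⟩ := List.exists_cons_of_ne_nil h
  show pvMin (x :: (t ++ [v])) = _
  simp only [pvMin, PySem.List.min?_id_cons, List.foldl_append, List.foldl_cons,
    List.foldl_nil, Option.getD_some]
  rcases (inferInstance : Decidable (v < t.foldl min x)) with hlt | hlt <;> rw [Int.min_def] <;>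
    split_ifs <;> omega

theorem pvRed_keys (g : PySem.Dict String (List Int)) : (pvRed g).keys = g.keys := by
  simp only [pvRed, PySem.Dict.keys, List.map_map]
  rfl

theorem pvRed_contains (g : PySem.Dict String (List Int)) (k : String) :
    (pvRed g).contains k = g.contains k := by
  rw [PySem.Dict.contains_eq_decide_mem_keys, PySem.Dict.contains_eq_decide_mem_keys, pvRed_keys]

theorem pvRed_getD (g : PySem.Dict String (List Int)) (k : String) (hnd : g.keys.Nodup) :
    (pvRed g).getD k 0 = pvMin (g.getD k []) := by
  by_cases hc : g.contains k = true
  · have hs : (g.get? k).isSome := by rw [← PySem.Dict.contains_eq_isSome_get?, hc]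
    obtain ⟨ps, hps⟩ := Option.isSome_iff_exists.mp hs
    have hmem : (k, ps) ∈ g.items := PySem.Dict.mem_items_of_get?_eq_some g hps
    have hmem' : (k, pvMin ps) ∈ (pvRed g).items := by
      simp only [pvRed]
      exact List.mem_map.mpr ⟨(k, ps), hmem, rfl⟩
    rw [PySem.Dict.getD_of_mem_items (pvRed g) hmem' (by rw [pvRed_keys]; exact hnd) 0,
        PySem.Dict.getD_of_get?_eq_some g [] hps]
  · rw [PySem.Dict.getD_of_not_contains (pvRed g) 0 (by rw [pvRed_contains]; exact eq_false_of_ne_true hc),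
        PySem.Dict.getD_of_not_contains g [] (eq_false_of_ne_true hc)]
    rfl

theorem pvStep_commute (g : PySem.Dict String (List Int)) (hnd : g.keys.Nodup)
    (hne : ∀ p ∈ g.items, p.2 ≠ []) (k : String) (v : Int) :
    pvRed (pvStepB g (k, v)) = pvStepA (pvRed g) (k, v) := by
  have hins : pvStepB g (k, v) = g.insert k (g.getD k [] ++ [v]) := rfl
  by_cases hc : g.contains k = true
  · -- key present: the entry at k is replaced in place, others untouched
    have hs : (g.get? k).isSome := by rw [← PySem.Dict.contains_eq_isSome_get?, hc]
    obtain ⟨ps, hps⟩ := Option.isSome_iff_exists.mp hs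
    have hgetD : g.getD k [] = ps := PySem.Dict.getD_of_get?_eq_some g [] hps
    have hpsne : ps ≠ [] := hne (k, ps) (PySem.Dict.mem_items_of_get?_eq_some g hps)
    have hredc : (pvRed g).contains k = true := by rw [pvRed_contains]; exact hc
    have hitems := PySem.Dict.items_insert_of_contains g (g.getD k [] ++ [v]) hc
    apply PySem.Dict.ext
    simp only [pvStepA, hredc, if_true, pvRed_getD g k hnd, hgetD]
    by_cases hlt : v < pvMin ps
    · simp only [hlt, if_true]
      rw [PySem.Dict.items_insert_of_contains (pvRed g) v hredc]
      show List.map pvRedF (pvStepB g (k, v)).items = _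
      rw [hins, hitems]
      simp only [pvRed, List.map_map]
      apply List.map_congr_left
      intro p hp
      by_cases hpk : p.1 = k
      · simp only [Function.comp, hpk, beq_self_eq_true, if_true, pvRedF, hgetD,
          pvMin_append ps v hpsne, hlt]
      · simp only [Function.comp, beq_iff_eq, hpk, if_false, pvRedF]
    · simp only [hlt, if_false]
      show List.map pvRedF (pvStepB g (k, v)).items = _
      rw [hins, hitems]
      simp only [pvRed, List.map_map]
      apply List.map_congr_left
      intro p hp
      by_cases hpk : p.1 = k
      · have hg : g.get? p.1 = some p.2 := PySem.Dict.get?_of_mem_items g hp hnd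
        rw [hpk, hps] at hg
        have hpv : p.2 = ps := (Option.some_inj.mp hg).symm
        simp only [Function.comp, hpk, beq_self_eq_true, if_true, pvRedF, hgetD,
          pvMin_append ps v hpsne, hlt, if_false, hpv]
      · simp only [Function.comp, beq_iff_eq, hpk, if_false]
  · -- fresh key: both sides append the new entry
    have hc' : g.contains k = false := eq_false_of_ne_true hc
    have hgetD : g.getD k [] = [] := PySem.Dict.getD_of_not_contains g [] hc'
    have hredc : (pvRed g).contains k = false := by rw [pvRed_contains]; exact hc'
    apply PySem.Dict.ext
    simp only [pvStepA, hredc, Bool.false_eq_true, if_false]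
    rw [PySem.Dict.items_insert_of_not_contains (pvRed g) v hredc]
    show List.map pvRedF (pvStepB g (k, v)).items = _
    rw [hins, hgetD, List.nil_append, PySem.Dict.items_insert_of_not_contains g [v] hc',
      List.map_append]
    rfl

theorem pvStepB_nodup (g : PySem.Dict String (List Int)) (hnd : g.keys.Nodup) (p : String × Int) :
    (pvStepB g p).keys.Nodup := PySem.Dict.nodup_keys_insert _ _ _ hnd

theorem pvStepB_ne (g : PySem.Dict String (List Int)) (hne : ∀ q ∈ g.items, q.2 ≠ [])
    (p : String × Int) : ∀ q ∈ (pvStepB g p).items, q.2 ≠ [] := by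
  intro q hq
  rcases (PySem.Dict.mem_items_insert _ _ _ _).mp hq with h | ⟨h, _⟩
  · subst h; simp
  · exact hne q h

theorem pvFoldB_nodup (L : List (String × Int)) :
    ∀ g : PySem.Dict String (List Int), g.keys.Nodup → (L.foldl pvStepB g).keys.Nodup := by
  induction L with
  | nil => intro g h; exact h
  | cons p t ih => intro g h; exact ih _ (pvStepB_nodup g h p)

theorem pvFoldB_ne (L : List (String × Int)) :
    ∀ g : PySem.Dict String (List Int), (∀ q ∈ g.items, q.2 ≠ []) →
      ∀ q ∈ (L.foldl pvStepB g).items, q.2 ≠ [] := by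
  induction L with
  | nil => intro g h; exact h
  | cons p t ih => intro g h; exact ih _ (pvStepB_ne g h p)

theorem pvInner (L : List (String × Int)) :
    ∀ g : PySem.Dict String (List Int), g.keys.Nodup → (∀ q ∈ g.items, q.2 ≠ []) →
      L.foldl pvStepA (pvRed g) = pvRed (L.foldl pvStepB g) := by
  induction L with
  | nil => intro g _ _; rfl
  | cons p t ih =>
    intro g hnd hne
    simp only [List.foldl_cons]
    rw [← pvStep_commute g hnd hne p.1 p.2]
    exact ih (pvStepB g p) (pvStepB_nodup g hnd p) (pvStepB_ne g hne p)

theorem pvOuter (dv : List (String × List (String × Int)))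
    (S : List (String × List (String × Int))) :
    ∀ g : PySem.Dict String (List Int), g.keys.Nodup → (∀ q ∈ g.items, q.2 ≠ []) →
      S.foldl (fun nd shops => ((PySem.Dict.mk dv).getD shops.1 []).foldl pvStepA nd) (pvRed g)
        = pvRed (S.foldl (fun gr shops =>
            ((PySem.Dict.mk dv).getD shops.1 []).foldl pvStepB gr) g) := by
  induction S with
  | nil => intro g _ _; rfl
  | cons s t ih =>
    intro g hnd hne
    simp only [List.foldl_cons]
    rw [pvInner _ g hnd hne]
    exact ih _ (pvFoldB_nodup _ g hnd) (pvFoldB_ne _ g hne)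

-- ===== VERDICT (by name: the statement is the Claim_ definition above) =====
theorem list_sorter_spec : Claim_equal_list_sorter := by
  intro dv _
  show list_sorter dv = list_sorter_alt dv
  have h := pvOuter dv dv PySem.Dict.empty (by simp [PySem.Dict.keys_empty])
    (by intro q hq; simp [PySem.Dict.empty] at hq)
  have hred : pvRed PySem.Dict.empty = PySem.Dict.empty := rfl
  rw [hred] at h
  change (dv.foldl (fun nd shops => ((PySem.Dict.mk dv).getD shops.1 []).foldl pvStepA nd)
      PySem.Dict.empty).items
    = ((dv.foldl (fun gr shops => ((PySem.Dict.mk dv).getD shops.1 []).foldl pvStepB gr)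
      PySem.Dict.empty).items).map (fun q => (q.1, (PySem.List.min? q.2 (fun y => y)).getD 0))
  rw [h]
  rfl
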